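-- pv_equiv track=rewrite | github.com/chebxuan/2D_HAAR1 | image_quantum_experiment.py | upsample_blocks
-- ===== SOURCE A (Python) =====
-- from typing import Dict, List, Tuple
--
-- def upsample_blocks(block_pixels: List[List[int]]) -> List[List[int]]:
--     h = len(block_pixels)
--     w = len(block_pixels[0])
--     upsampled = [[0] * (w * 2) for _ in range(h * 2)]
--     for y in range(h):
--         for x in range(w):
--             value = block_pixels[y][x]
--             upsampled[2 * y][2 * x] = value
--             upsampled[2 * y][2 * x + 1] = value
--             upsampled[2 * y + 1][2 * x] = value
--             upsampled[2 * y + 1][2 * x + 1] = value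
--     return upsampled
-- ===== SOURCE B (Python) =====
-- from typing import List
--
--
-- def upsample_blocks(block_pixels: List[List[int]]) -> List[List[int]]:
--     h = len(block_pixels)
--     w = len(block_pixels[0])
--     return [[block_pixels[y // 2][x // 2] for x in range(2 * w)]
--             for y in range(2 * h)]
-- ===== Notes on version B (the rewrite author's own statement) =====
-- stated objective: alternative
-- what changed: Gather instead of scatter: A pre-allocates a zero grid and writes each input pixel into its four output cells; B iterates the OUTPUT coordinates and reads each output cell directly from the input via halved indices, with no mutable grid.
import Mathlib
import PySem

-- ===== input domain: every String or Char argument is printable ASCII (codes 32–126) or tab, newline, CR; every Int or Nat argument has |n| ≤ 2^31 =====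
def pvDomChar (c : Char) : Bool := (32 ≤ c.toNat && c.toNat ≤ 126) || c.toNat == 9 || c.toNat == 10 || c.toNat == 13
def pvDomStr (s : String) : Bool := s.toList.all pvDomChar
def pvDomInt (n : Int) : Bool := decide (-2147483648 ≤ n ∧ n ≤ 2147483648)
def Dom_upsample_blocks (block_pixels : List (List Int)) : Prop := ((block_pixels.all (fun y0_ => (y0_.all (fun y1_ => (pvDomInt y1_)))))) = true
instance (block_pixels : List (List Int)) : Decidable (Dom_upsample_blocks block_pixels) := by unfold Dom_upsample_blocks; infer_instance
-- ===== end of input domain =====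

-- B gathers: it iterates the OUTPUT coordinates and reads each cell from block_pixels[y//2][x//2],
-- instead of A's scatter (pre-allocated zero grid, four index writes per input pixel); objective: alternative.

-- ===== PORT A =====
-- upsampled[r][c] = v  (read the row object, write one cell, write the row back)
def setCell (g : List (List Int)) (r c : Nat) (v : Int) : List (List Int) :=
  g.set r ((g.getD r []).set c v)

def upsample_blocks (block_pixels : List (List Int)) : List (List Int) :=
  match PySem.List.pyGet? block_pixels 0 with
  | none => []   -- Python raises IndexError here (empty input); excluded by Pre_
  | some row0 =>
    let h := block_pixels.length
    let w := row0.length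
    let init := (List.range (h*2)).map (fun _ => List.replicate (w*2) (0:Int))
    (List.range h).foldl (fun g y =>
      (List.range w).foldl (fun g x =>
        let value := (block_pixels.getD y []).getD x 0
        let g := setCell g (2*y) (2*x) value
        let g := setCell g (2*y) (2*x+1) value
        let g := setCell g (2*y+1) (2*x) value
        setCell g (2*y+1) (2*x+1) value) g) init

-- ===== PORT B =====
-- [[block_pixels[y // 2][x // 2] for x in range(2*w)] for y in range(2*h)]
-- y,x are Nats drawn from range, so Nat division is exact for Python's '//' here;
-- indices y//2 < h, x//2 < w are in range on Pre_, so getD reads the same cell Python does.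
def upsample_blocks_alt (block_pixels : List (List Int)) : List (List Int) :=
  match PySem.List.pyGet? block_pixels 0 with
  | none => []   -- Python raises IndexError here (empty input); excluded by Pre_
  | some row0 =>
    let h := block_pixels.length
    let w := row0.length
    (List.range (2*h)).map (fun y =>
      (List.range (2*w)).map (fun x => (block_pixels.getD (y/2) []).getD (x/2) 0))

-- ===== PRECONDITION & SPEC =====
-- Pre_ excludes exactly the inputs on which Python A raises IndexError: the empty list
-- (block_pixels[0]) and blocks with a row shorter than the first row (block_pixels[y][x]).
def Pre_upsample_blocks (block_pixels : List (List Int)) : Prop :=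
  block_pixels ≠ [] ∧ ∀ r ∈ block_pixels, (block_pixels.headD []).length ≤ r.length
instance (block_pixels : List (List Int)) : Decidable (Pre_upsample_blocks block_pixels) := by
  unfold Pre_upsample_blocks; infer_instance

def pvWitness_upsample_blocks : List (List Int) := [[1, 2], [3, 4]]

def Spec_upsample_blocks (block_pixels : List (List Int)) (out : List (List Int)) : Prop := out = upsample_blocks_alt block_pixels
instance (block_pixels : List (List Int)) (out : List (List Int)) : Decidable (Spec_upsample_blocks block_pixels out) := by unfold Spec_upsample_blocks; infer_instance

-- ===== CLAIM (what is proved, stated in full; the proofs are below) =====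
def Claim_equal_upsample_blocks : Prop := ∀ (block_pixels : List (List Int)), Dom_upsample_blocks block_pixels → Pre_upsample_blocks block_pixels → Spec_upsample_blocks block_pixels (upsample_blocks block_pixels)

-- ===== LEMMAS AND PROOFS =====

-- the horizontal duplication of a full row (common normal form for both sides)
def dup (l : List Int) : List Int := l.flatMap (fun p => [p, p])

lemma setCell_mid0 (P S : List (List Int)) (a b : List Int) (c : Nat) (v : Int) :
    setCell (P ++ a :: b :: S) P.length c v = P ++ a.set c v :: b :: S := by
  simp [setCell, List.set_append_right]

lemma setCell_mid1 (P S : List (List Int)) (a b : List Int) (c : Nat) (v : Int) :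
    setCell (P ++ a :: b :: S) (P.length + 1) c v = P ++ a :: b.set c v :: S := by
  simp [setCell, List.set_append_right]

lemma rowset (done rest : List Int) (x v : Int) :
    (done ++ x :: rest).set done.length v = done ++ v :: rest := by
  simp [List.set_append_right]

lemma rowset1 (done rest : List Int) (x0 x1 v : Int) :
    (done ++ x0 :: x1 :: rest).set (done.length + 1) v = done ++ x0 :: v :: rest := by
  have h := rowset (done ++ [x0]) rest x1 v
  simp only [List.length_append, List.length_cons, List.length_nil, List.append_assoc,
    List.cons_append, List.nil_append] at h
  exact h

lemma inner_fill (rv : List Int) (y : Nat) (P : List (List Int)) (hP : P.length = 2*y) :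
    ∀ (suf : List Int) (j : Nat) (S : List (List Int)) (done : List Int),
    done.length = 2*j → suf <+: rv.drop j →
    (List.range' j suf.length).foldl (fun g x =>
        let value := rv.getD x 0
        let g := setCell g (2*y) (2*x) value
        let g := setCell g (2*y) (2*x+1) value
        let g := setCell g (2*y+1) (2*x) value
        setCell g (2*y+1) (2*x+1) value)
      (P ++ (done ++ List.replicate (2*suf.length) 0) :: (done ++ List.replicate (2*suf.length) 0) :: S)
    = P ++ (done ++ dup suf) :: (done ++ dup suf) :: S := by
  intro suf
  induction suf with
  | nil => intro j S done _ _; simp [dup]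
  | cons s t ih =>
    intro j S done hd hpre
    obtain ⟨u, hu⟩ := hpre
    have hget : rv.getD j 0 = s := by
      have h0 : rv[j]? = (rv.drop j)[0]? := by simp [List.getElem?_drop]
      rw [List.getD_eq_getElem?_getD, h0, ← hu]; simp
    have hrep : List.replicate (2*(t.length+1)) (0:Int)
        = 0 :: 0 :: List.replicate (2*t.length) 0 := by
      rw [show 2*(t.length+1) = 2*t.length + 1 + 1 by omega,
        List.replicate_succ, List.replicate_succ]
    simp only [← hP] at ih ⊢
    rw [List.length_cons, List.range'_succ, List.foldl_cons]
    simp only [hrep, hget]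
    rw [show 2*j = done.length by omega]
    simp only [setCell_mid0, setCell_mid1, rowset, rowset1]
    have hrows : done ++ s :: s :: List.replicate (2*t.length) 0
        = (done ++ [s, s]) ++ List.replicate (2*t.length) 0 := by simp
    rw [hrows]
    rw [ih (j+1) S (done ++ [s, s]) (by simp [hd]; omega)
      ⟨u, by rw [← List.drop_drop, ← hu]; simp⟩]
    simp [dup]

-- A's outer loop over range' k |rest| turns the blank tail into the expanded rows of rest
lemma outer_fill (bp : List (List Int)) (w : Nat) (hw : ∀ r ∈ bp, w ≤ r.length) :
    ∀ (rest : List (List Int)) (k : Nat) (pre : List (List Int)),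
    bp.drop k = rest → pre.length = 2*k →
    (List.range' k rest.length).foldl (fun g y =>
      (List.range w).foldl (fun g x =>
        let value := (bp.getD y []).getD x 0
        let g := setCell g (2*y) (2*x) value
        let g := setCell g (2*y) (2*x+1) value
        let g := setCell g (2*y+1) (2*x) value
        setCell g (2*y+1) (2*x+1) value) g)
      (pre ++ List.replicate (2*rest.length) (List.replicate (2*w) (0:Int)))
    = pre ++ rest.flatMap (fun r => [dup (r.take w), dup (r.take w)]) := by
  intro rest
  induction rest with
  | nil => intro k pre _ _; simp
  | cons r rest' ih =>
    intro k pre hdrop hpre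
    have hr : r ∈ bp := by
      have : r ∈ bp.drop k := by rw [hdrop]; exact List.mem_cons_self
      exact List.mem_of_mem_drop this
    have hwr : w ≤ r.length := hw r hr
    have hbk : bp.getD k [] = r := by
      have h0 : bp[k]? = (bp.drop k)[0]? := by simp [List.getElem?_drop]
      rw [List.getD_eq_getElem?_getD, h0, hdrop]; simp
    have htake : (r.take w).length = w := by simp [hwr]
    have hrep : List.replicate (2*(rest'.length+1)) (List.replicate (2*w) (0:Int))
        = List.replicate (2*w) 0 :: List.replicate (2*w) 0 :: List.replicate (2*rest'.length) (List.replicate (2*w) 0) := by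
      rw [show 2*(rest'.length+1) = 2*rest'.length + 1 + 1 by omega,
        List.replicate_succ, List.replicate_succ]
    rw [List.length_cons, List.range'_succ, List.foldl_cons]
    simp only [hrep, hbk]
    simp only [List.range_eq_range'] at ih ⊢
    have hinner := inner_fill r k pre hpre (r.take w) 0 (List.replicate (2*rest'.length) (List.replicate (2*w) 0)) [] rfl (by simpa using List.take_prefix w r)
    simp only [List.nil_append, htake] at hinner
    rw [hinner]
    rw [show pre ++ dup (r.take w) :: dup (r.take w) :: List.replicate (2*rest'.length) (List.replicate (2*w) (0:Int))
        = (pre ++ [dup (r.take w), dup (r.take w)]) ++ List.replicate (2*rest'.length) (List.replicate (2*w) 0) by simp]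
    rw [ih (k+1) (pre ++ [dup (r.take w), dup (r.take w)]) (by have h := congrArg (List.drop 1) hdrop; rw [List.drop_drop] at h; simpa [Nat.add_comm] using h) (by simp [hpre]; omega)]
    simp

-- mapping f (y/2) over range (2n) is flatMap of the pair [f y, f y] over range n
lemma halfmap {α : Type} (f : Nat → α) :
    ∀ n : Nat, (List.range (2*n)).map (fun y => f (y/2))
      = (List.range n).flatMap (fun y => [f y, f y]) := by
  intro n
  induction n with
  | zero => simp
  | succ m ih =>
    rw [show 2*(m+1) = 2*m + 1 + 1 by omega, List.range_succ, List.range_succ,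
      List.range_succ, List.map_append, List.map_append, ih, List.flatMap_append]
    have h1 : (2*m) / 2 = m := by omega
    have h2 : (2*m + 1) / 2 = m := by omega
    simp [h1, h2]

-- reading the first w cells through getD reconstructs r.take w
lemma range_map_getD (r : List Int) (w : Nat) (hw : w ≤ r.length) :
    (List.range w).map (fun x => r.getD x 0) = r.take w := by
  apply List.ext_getElem
  · simp [hw]
  · intro i h1 h2
    simp only [List.getElem_map, List.getElem_range, List.getElem_take]
    rw [List.getD_eq_getElem?_getD, List.getElem?_eq_getElem (by simp at h1; omega)]
    simp

-- ===== VERDICT (by name: the statement is the Claim_ definition above) =====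
theorem upsample_blocks_spec : Claim_equal_upsample_blocks := by
  intro bp _hdom hpre
  obtain ⟨hne, hlen⟩ := hpre
  unfold Spec_upsample_blocks
  cases bp with
  | nil => exact absurd rfl hne
  | cons b0 tl =>
    simp only [upsample_blocks, upsample_blocks_alt, PySem.List.pyGet?_zero_cons]
    set bp := b0 :: tl with hbp
    set w := b0.length with hwdef
    have hw : ∀ r ∈ bp, w ≤ r.length := by
      intro r hr; simpa using hlen r hr
    -- A's side: scatter fold = flatMap of duplicated rows
    have hinit : (List.range (bp.length*2)).map (fun _ => List.replicate (w*2) (0:Int))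
        = List.replicate (2*bp.length) (List.replicate (2*w) 0) := by
      rw [show bp.length*2 = 2*bp.length by ring, show w*2 = 2*w by ring]
      simp [List.map_const']
    have houter := outer_fill bp w hw bp 0 [] rfl rfl
    simp only [List.nil_append] at houter
    rw [hinit]
    simp only [List.range_eq_range'] at houter ⊢
    rw [houter]
    -- B's side: gather map = the same flatMap
    simp only [← List.range_eq_range']
    rw [halfmap (fun y => (List.range (2*w)).map (fun x => (bp.getD y []).getD (x/2) 0)) bp.length]
    have hrow : ∀ y, (List.range (2*w)).map (fun x => (bp.getD y []).getD (x/2) 0)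
        = (List.range w).flatMap (fun x => [(bp.getD y []).getD x 0, (bp.getD y []).getD x 0]) :=
      fun y => halfmap (fun x => (bp.getD y []).getD x 0) w
    simp only [hrow]
    -- flatMap over indices = flatMap over the list itself, row by row
    have hidx : (List.range bp.length).map (fun y => bp.getD y []) = bp := by
      apply List.ext_getElem
      · simp
      · intro i h1 h2
        simp only [List.getElem_map, List.getElem_range]
        rw [List.getD_eq_getElem?_getD, List.getElem?_eq_getElem (by simpa using h2)]
        simp
    have key : ∀ y < bp.length, (List.range w).flatMap (fun x => [(bp.getD y []).getD x 0, (bp.getD y []).getD x 0])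
        = dup ((bp.getD y []).take w) := by
      intro y hy
      set r := bp.getD y [] with hrdef
      have hr : r ∈ bp := by
        rw [hrdef, List.getD_eq_getElem?_getD, List.getElem?_eq_getElem hy]
        exact List.getElem_mem hy
      conv_rhs => rw [dup, ← range_map_getD r w (hw r hr), List.flatMap_map]
    have hcong : (List.range bp.length).flatMap
        (fun y => [(List.range w).flatMap (fun x => [(bp.getD y []).getD x 0, (bp.getD y []).getD x 0]),
                   (List.range w).flatMap (fun x => [(bp.getD y []).getD x 0, (bp.getD y []).getD x 0])])
        = (List.range bp.length).flatMap
            (fun y => [dup (List.take w (bp.getD y [])), dup (List.take w (bp.getD y []))]) :=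
      List.flatMap_congr (fun y hy => by rw [key y (List.mem_range.mp hy)])
    rw [hcong]
    have hback := List.flatMap_map (fun y => bp.getD y [])
      (fun r => [dup (List.take w r), dup (List.take w r)]) (List.range bp.length)
    rw [hidx] at hback
    rw [← hback]
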